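-- pv_equiv track=rewrite | github.com/1flei/PythoC | pythoc/cfg/linear_checker.py | snapshots_compatible
-- ===== SOURCE A (Python) =====
-- from typing import Dict, List, Optional, Set, Tuple, Any, TYPE_CHECKING
--
-- LinearSnapshot = Dict[str, Dict[Tuple[int, ...], str]]
--
-- def snapshots_compatible(s1: LinearSnapshot, s2: LinearSnapshot) -> bool:
--     """Check if two snapshots are compatible for merging
--
--     Two snapshots are compatible if for every (var_name, path):
--     - Both have 'active', OR
--     - Both have non-active (consumed/undefined)
--
--     We don't require exact state match - just whether it's usable or not.
--
--     Args:
--         s1: First snapshot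
--         s2: Second snapshot
--
--     Returns:
--         True if snapshots are compatible
--     """
--     all_vars = set(s1.keys()) | set(s2.keys())
--     for var_name in all_vars:
--         paths1 = s1.get(var_name, {})
--         paths2 = s2.get(var_name, {})
--         all_paths = set(paths1.keys()) | set(paths2.keys())
--
--         for path in all_paths:
--             state1 = paths1.get(path, 'undefined')
--             state2 = paths2.get(path, 'undefined')
--             # Only compare active vs non-active
--             is_active1 = (state1 == 'active')
--             is_active2 = (state2 == 'active')
--             if is_active1 != is_active2:
--                 return False
--     return True
-- ===== SOURCE B (Python) =====
-- def snapshots_compatible(s1, s2):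
--     """Simpler: compare the flat sets of (var_name, path) pairs that are 'active'."""
--     active1 = {(v, p) for v, paths in s1.items() for p, st in paths.items() if st == 'active'}
--     active2 = {(v, p) for v, paths in s2.items() for p, st in paths.items() if st == 'active'}
--     return active1 == active2
-- ===== Notes on version B (the rewrite author's own statement) =====
-- stated objective: simpler
-- what changed: Replaces the nested union-of-keys iteration with per-variable default lookups by building one flat set of active (var_name, path) pairs per snapshot and returning a single set equality (one pass per snapshot, no per-key get() calls).
import Mathlib
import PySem

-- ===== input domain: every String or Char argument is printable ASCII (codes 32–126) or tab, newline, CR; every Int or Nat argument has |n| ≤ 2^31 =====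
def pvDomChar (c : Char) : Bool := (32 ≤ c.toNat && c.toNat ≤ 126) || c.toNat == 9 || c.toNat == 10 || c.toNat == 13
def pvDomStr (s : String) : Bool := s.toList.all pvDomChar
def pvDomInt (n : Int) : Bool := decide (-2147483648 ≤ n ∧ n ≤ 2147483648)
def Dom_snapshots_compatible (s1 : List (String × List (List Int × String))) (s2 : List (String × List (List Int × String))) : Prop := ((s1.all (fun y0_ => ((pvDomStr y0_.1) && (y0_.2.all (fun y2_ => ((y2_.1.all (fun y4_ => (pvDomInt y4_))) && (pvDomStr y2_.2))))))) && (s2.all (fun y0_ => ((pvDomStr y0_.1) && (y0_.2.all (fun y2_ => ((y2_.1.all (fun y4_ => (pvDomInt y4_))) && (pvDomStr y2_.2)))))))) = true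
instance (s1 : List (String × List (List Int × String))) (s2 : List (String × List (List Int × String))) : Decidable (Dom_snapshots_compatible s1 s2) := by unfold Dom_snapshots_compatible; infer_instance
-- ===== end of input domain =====

-- B builds one flat set of active (var, path) pairs per snapshot and compares them,
-- replacing A's nested union-of-keys loops with default lookups (objective: simpler).

-- ===== PORT A =====
-- s.get(v, {}) on the outer dict (first-match association-list lookup)
def pvGetPaths (s : List (String × List (List Int × String))) (v : String) : List (List Int × String) :=
  ((s.find? (fun kv => kv.1 == v)).map Prod.snd).getD []

-- paths.get(p, 'undefined') on an inner dict
def pvGetState (paths : List (List Int × String)) (p : List Int) : String :=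
  ((paths.find? (fun kv => kv.1 == p)).map Prod.snd).getD "undefined"

def snapshots_compatible (s1 : List (String × List (List Int × String))) (s2 : List (String × List (List Int × String))) : Bool :=
  -- all_vars = set(s1.keys()) | set(s2.keys()); the for-loops with early `return False`
  -- are the order-independent `.all` over the sets.
  (PySem.Set.union (PySem.Set.ofList (s1.map Prod.fst)) (s2.map Prod.fst)).all (fun var_name =>
    let paths1 := pvGetPaths s1 var_name
    let paths2 := pvGetPaths s2 var_name
    (PySem.Set.union (PySem.Set.ofList (paths1.map Prod.fst)) (paths2.map Prod.fst)).all (fun path =>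
      let state1 := pvGetState paths1 path
      let state2 := pvGetState paths2 path
      (state1 == "active") == (state2 == "active")))

-- ===== PORT B =====
-- the set comprehension {(v, p) for v, paths in s for p, st in paths if st == 'active'}
def pvActive (s : List (String × List (List Int × String))) : PySem.Set (String × List Int) :=
  PySem.Set.ofList
    (s.flatMap (fun vp => ((vp.2.filter (fun ps => ps.2 == "active")).map (fun ps => (vp.1, ps.1)))))

def snapshots_compatible_alt (s1 : List (String × List (List Int × String))) (s2 : List (String × List (List Int × String))) : Bool :=
  PySem.Set.equal (pvActive s1) (pvActive s2)

-- ===== PRECONDITION & SPEC =====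
-- Pre_ excludes association lists with duplicate keys (outer variable names or inner paths):
-- such lists do not represent a Python dict, so A's first-match-vs-collapsed behaviour there is an
-- artefact of the encoding, not of the function.
def Pre_snapshots_compatible (s1 : List (String × List (List Int × String))) (s2 : List (String × List (List Int × String))) : Prop :=
  (s1.map Prod.fst).Nodup ∧ (s2.map Prod.fst).Nodup ∧
  (∀ vp ∈ s1, (vp.2.map Prod.fst).Nodup) ∧ (∀ vp ∈ s2, (vp.2.map Prod.fst).Nodup)
instance (s1 : List (String × List (List Int × String))) (s2 : List (String × List (List Int × String))) : Decidable (Pre_snapshots_compatible s1 s2) := by unfold Pre_snapshots_compatible; infer_instance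

def pvWitness_snapshots_compatible : (List (String × List (List Int × String))) × (List (String × List (List Int × String))) :=
  ([("x", [([0], "active")]), ("y", [([1], "consumed")])], [("x", [([0], "active")])])

def Spec_snapshots_compatible (s1 : List (String × List (List Int × String))) (s2 : List (String × List (List Int × String))) (out : Bool) : Prop := out = snapshots_compatible_alt s1 s2
instance (s1 : List (String × List (List Int × String))) (s2 : List (String × List (List Int × String))) (out : Bool) : Decidable (Spec_snapshots_compatible s1 s2 out) := by unfold Spec_snapshots_compatible; infer_instance

-- ===== CLAIM (what is proved, stated in full; the proofs are below) =====
def Claim_equal_snapshots_compatible : Prop := ∀ (s1 : List (String × List (List Int × String))) (s2 : List (String × List (List Int × String))), Dom_snapshots_compatible s1 s2 → Pre_snapshots_compatible s1 s2 → Spec_snapshots_compatible s1 s2 (snapshots_compatible s1 s2)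

-- ===== LEMMAS AND PROOFS =====

-- the semantic kernel both programs compute: is (v, p) active in snapshot s?
def pvActiveAt (s : List (String × List (List Int × String))) (v : String) (p : List Int) : Bool :=
  pvGetState (pvGetPaths s v) p == "active"

theorem find?_of_nodup {α : Type} {β : Type} [BEq α] [LawfulBEq α]
    (l : List (α × β)) (hnd : (l.map Prod.fst).Nodup) {k : α} {b : β} (h : (k, b) ∈ l) :
    l.find? (fun kv => kv.1 == k) = some (k, b) := by
  induction l with
  | nil => cases h
  | cons hd tl ih =>
    simp only [List.map_cons, List.nodup_cons] at hnd
    rcases List.mem_cons.mp h with h | h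
    · subst h; simp [List.find?]
    · have hne : (hd.1 == k) = false := by
        have : k ∈ tl.map Prod.fst := List.mem_map.mpr ⟨(k, b), h, rfl⟩
        simp only [beq_eq_false_iff_ne, ne_eq]
        intro he; exact hnd.1 (he ▸ this)
      simp [List.find?, hne, ih hnd.2 h]

theorem find?_of_not_mem {α : Type} {β : Type} [BEq α] [LawfulBEq α]
    (l : List (α × β)) {k : α} (h : k ∉ l.map Prod.fst) :
    l.find? (fun kv => kv.1 == k) = none := by
  rw [List.find?_eq_none]
  intro kv hm hk
  exact h (List.mem_map.mpr ⟨kv, hm, by simpa using hk⟩)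

theorem mem_pvActive_iff (s : List (String × List (List Int × String)))
    (hnd : (s.map Prod.fst).Nodup) (hin : ∀ vp ∈ s, (vp.2.map Prod.fst).Nodup)
    (v : String) (p : List Int) :
    (v, p) ∈ pvActive s ↔ pvActiveAt s v p = true := by
  unfold pvActive pvActiveAt pvGetState pvGetPaths
  rw [PySem.Set.mem_ofList, List.mem_flatMap]
  constructor
  · rintro ⟨⟨v', paths⟩, hmem, hpair⟩
    simp only [List.mem_map, List.mem_filter] at hpair
    rcases hpair with ⟨⟨p', st⟩, ⟨hps, hst⟩, heq⟩
    obtain ⟨rfl, rfl⟩ : v' = v ∧ p' = p := by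
      constructor <;> [exact (congrArg Prod.fst heq); exact (congrArg Prod.snd heq)]
    rw [find?_of_nodup s hnd hmem]
    simp only [Option.map_some, Option.getD_some]
    rw [find?_of_nodup paths (hin _ hmem) hps]
    simpa using hst
  · intro h
    cases hf : s.find? (fun kv => kv.1 == v) with
    | none => rw [hf] at h; simp at h
    | some vp =>
      rw [hf] at h
      have hmem := List.mem_of_find?_eq_some hf
      have hkey : vp.1 = v := by
        have := List.find?_some hf; simpa using this
      simp only [Option.map_some, Option.getD_some] at h
      cases hg : vp.2.find? (fun kv => kv.1 == p) with
      | none => rw [hg] at h; simp at h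
      | some ps =>
        rw [hg] at h
        have hpm := List.mem_of_find?_eq_some hg
        have hpkey : ps.1 = p := by
          have := List.find?_some hg; simpa using this
        refine ⟨vp, hmem, ?_⟩
        simp only [List.mem_map, List.mem_filter]
        refine ⟨ps, ⟨hpm, ?_⟩, by rw [hkey, hpkey]⟩
        simpa using h

theorem A_true_iff (s1 s2 : List (String × List (List Int × String))) :
    snapshots_compatible s1 s2 = true ↔
      ∀ v p, pvActiveAt s1 v p = pvActiveAt s2 v p := by
  unfold snapshots_compatible
  rw [List.all_eq_true]
  constructor
  · intro h v p
    by_cases hv : v ∈ s1.map Prod.fst ∨ v ∈ s2.map Prod.fst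
    · have hv' : v ∈ PySem.Set.union (PySem.Set.ofList (s1.map Prod.fst)) (s2.map Prod.fst) := by
        rw [PySem.Set.mem_union, PySem.Set.mem_ofList]; exact hv
      have h2 := h v hv'
      simp only [List.all_eq_true] at h2
      by_cases hp : p ∈ (pvGetPaths s1 v).map Prod.fst ∨ p ∈ (pvGetPaths s2 v).map Prod.fst
      · have hp' : p ∈ PySem.Set.union (PySem.Set.ofList ((pvGetPaths s1 v).map Prod.fst)) ((pvGetPaths s2 v).map Prod.fst) := by
          rw [PySem.Set.mem_union, PySem.Set.mem_ofList]; exact hp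
        have h3 := h2 p hp'
        unfold pvActiveAt
        simpa [beq_iff_eq] using h3
      · push Not at hp
        unfold pvActiveAt pvGetState
        rw [find?_of_not_mem _ hp.1, find?_of_not_mem _ hp.2]
    · push Not at hv
      unfold pvActiveAt pvGetPaths
      rw [find?_of_not_mem _ hv.1, find?_of_not_mem _ hv.2]
  · intro h v _
    rw [List.all_eq_true]
    intro p _
    have := h v p
    unfold pvActiveAt at this
    simpa [beq_iff_eq] using this

theorem snapshots_compatible_spec : Claim_equal_snapshots_compatible := by
  intro s1 s2 _ hpre
  unfold Spec_snapshots_compatible snapshots_compatible_alt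
  obtain ⟨h1, h2, h3, h4⟩ := hpre
  rcases hA : snapshots_compatible s1 s2 with _ | _
  · -- A = false : B must be false
    symm
    rw [Bool.eq_false_iff]
    intro hB
    rw [PySem.Set.equal_iff] at hB
    have : snapshots_compatible s1 s2 = true := by
      rw [A_true_iff]
      intro v p
      have hm := hB (v, p)
      rw [mem_pvActive_iff s1 h1 h3, mem_pvActive_iff s2 h2 h4] at hm
      rcases ha : pvActiveAt s1 v p with _ | _ <;> rcases hb : pvActiveAt s2 v p with _ | _ <;>
        simp_all
    rw [hA] at this; cases this
  · -- A = true : B must be true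
    symm
    rw [PySem.Set.equal_iff]
    rintro ⟨v, p⟩
    rw [mem_pvActive_iff s1 h1 h3 v p, mem_pvActive_iff s2 h2 h4 v p]
    rw [A_true_iff] at hA
    rw [hA v p]
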